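-- pv_equiv track=rewrite | github.com/rjsengar/leetcode | 2679-count-distinct-numbers-on-board/2679-count-distinct-numbers-on-board.py | distinctIntegers
-- ===== SOURCE A (Python) =====
-- def distinctIntegers(n: int) -> int:
--     c=0
--     d={}
--     if n==1:
--         return 1
--     for i in range(1,n+1):
--         for j in range(1,n+1):
--             if i%j==1 and i not in d:
--                 d[i]=1
--                 c+=1
--     return c
-- ===== SOURCE B (Python) =====
-- def distinctIntegers(n: int) -> int:
--     # Closed form: for n >= 2 the reachable numbers are {1} ∪ {3..n}, i.e. n-1 of them;
--     # n == 1 gives 1; n <= 0 gives an empty board loop, i.e. 0.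
--     return 1 if n == 1 else max(0, n - 1)
-- ===== Notes on version B (the rewrite author's own statement) =====
-- stated objective: faster
-- what changed: Replaced the O(n^2) nested loops with a dict by an O(1) closed-form expression, proved equal via a characterization of which board numbers admit a witness divisor.
import Mathlib
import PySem

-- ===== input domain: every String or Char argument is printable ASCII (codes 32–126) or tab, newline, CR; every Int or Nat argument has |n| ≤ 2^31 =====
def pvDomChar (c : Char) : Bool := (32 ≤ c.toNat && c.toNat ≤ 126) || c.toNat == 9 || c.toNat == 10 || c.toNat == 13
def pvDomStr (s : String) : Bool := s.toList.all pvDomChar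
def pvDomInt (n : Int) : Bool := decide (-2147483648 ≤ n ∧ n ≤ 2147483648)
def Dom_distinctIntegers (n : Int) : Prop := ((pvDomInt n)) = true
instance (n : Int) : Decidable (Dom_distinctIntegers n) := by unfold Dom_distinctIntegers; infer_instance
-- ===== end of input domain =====

-- B replaces A's O(n^2) double loop over a dict by the closed form 1 if n==1 else max(0, n-1).

-- ===== PORT A =====
def distinctIntegers (n : Int) : Int :=
  -- c = 0; d = {}; if n == 1: return 1; nested for-loops; return c
  if n == 1 then 1
  else
    (((PySem.List.pyRange 1 (n + 1) 1).foldl (fun (st : Int × PySem.Dict Int Int) i =>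
        (PySem.List.pyRange 1 (n + 1) 1).foldl (fun (st : Int × PySem.Dict Int Int) j =>
          if PySem.Int.mod i j == 1 && !st.2.contains i then (st.1 + 1, st.2.insert i 1) else st)
          st)
      ((0 : Int), (PySem.Dict.empty : PySem.Dict Int Int)))).1

-- ===== PORT B =====
def distinctIntegers_alt (n : Int) : Int :=
  if n == 1 then 1 else max 0 (n - 1)

-- ===== PRECONDITION & SPEC =====
def Spec_distinctIntegers (n : Int) (out : Int) : Prop := out = distinctIntegers_alt n
instance (n : Int) (out : Int) : Decidable (Spec_distinctIntegers n out) := by unfold Spec_distinctIntegers; infer_instance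

-- ===== CLAIM (what is proved, stated in full; the proofs are below) =====
def Claim_equal_distinctIntegers : Prop := ∀ (n : Int), Dom_distinctIntegers n → Spec_distinctIntegers n (distinctIntegers n)

-- ===== LEMMAS AND PROOFS =====

-- The inner loop over j either inserts i once (if i is fresh and some j has i % j == 1) or does nothing.
theorem pv_inner_eq (i : Int) (l : List Int) (c : Int) (d : PySem.Dict Int Int) :
    l.foldl (fun (st : Int × PySem.Dict Int Int) j =>
        if PySem.Int.mod i j == 1 && !st.2.contains i then (st.1 + 1, st.2.insert i 1) else st)
      (c, d)
    = if !d.contains i && l.any (fun j => PySem.Int.mod i j == 1) then (c + 1, d.insert i 1)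
      else (c, d) := by
  induction l generalizing c d with
  | nil => simp
  | cons j l ih =>
    simp only [List.foldl_cons, List.any_cons]
    rcases Bool.eq_false_or_eq_true (PySem.Int.mod i j == 1) with hm | hm
    · -- this j satisfies i % j == 1
      rcases Bool.eq_false_or_eq_true (d.contains i) with hc | hc
      · rw [if_neg (by simp [hc]), ih]
        simp [hc]
      · rw [if_pos (by simp [hm, hc]), ih]
        rw [if_neg (by simp [PySem.Dict.contains_insert_self])]
        have hm2 : PySem.Int.mod i j = 1 := by simpa using hm
        simp [hc, hm2]
    · -- this j does not satisfy i % j == 1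
      rw [if_neg (by simp [hm]), ih]
      have hm2 : ¬ PySem.Int.mod i j = 1 := by simpa using hm
      simp [hm2]

-- The outer loop over a duplicate-free list of fresh keys counts the i admitting a witness j.
theorem pv_outer_eq (R : List Int) (l : List Int) (c : Int) (d : PySem.Dict Int Int)
    (hnd : l.Nodup) (hfresh : ∀ i ∈ l, d.contains i = false) :
    ((l.foldl (fun (st : Int × PySem.Dict Int Int) i =>
        R.foldl (fun (st : Int × PySem.Dict Int Int) j =>
          if PySem.Int.mod i j == 1 && !st.2.contains i then (st.1 + 1, st.2.insert i 1) else st)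
          st)
      (c, d))).1
    = c + (l.countP (fun i => R.any (fun j => PySem.Int.mod i j == 1)) : Int) := by
  induction l generalizing c d with
  | nil => simp
  | cons i l ih =>
    simp only [List.foldl_cons, List.countP_cons]
    rw [pv_inner_eq]
    have hci : d.contains i = false := hfresh i (List.mem_cons_self ..)
    have hnd' : l.Nodup := hnd.of_cons
    have hfresh0 : ∀ i' ∈ l, d.contains i' = false :=
      fun i' hi' => hfresh i' (List.mem_cons_of_mem _ hi')
    rcases Bool.eq_false_or_eq_true (R.any (fun j => PySem.Int.mod i j == 1)) with ha | ha
    case inr =>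
      rw [if_neg (by simp [ha]), ih _ _ hnd' hfresh0]
      simp [ha]
    case inl =>
      have hfresh' : ∀ i' ∈ l, (d.insert i 1).contains i' = false := by
        intro i' hi'
        rw [PySem.Dict.contains_insert]
        have hne : i' ≠ i := fun h => (List.nodup_cons.mp hnd).1 (h ▸ hi')
        simp [hne, hfresh0 i' hi']
      rw [if_pos (by simp [hci, ha]), ih _ _ hnd' hfresh']
      simp only [ha, if_pos]
      omega

-- For n ≥ 2 and 1 ≤ i ≤ n, some j in 1..n gives i % j == 1 exactly when i ≠ 2.
theorem pv_any_iff (n i : Int) (hn : 2 ≤ n) (h1 : 1 ≤ i) (h2 : i < n + 1) :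
    (PySem.List.pyRange 1 (n + 1) 1).any (fun j => PySem.Int.mod i j == 1) = decide (i ≠ 2) := by
  by_cases hi2 : i = 2
  · subst hi2
    simp only [ne_eq, decide_not, decide_true, Bool.not_true]
    rw [List.any_eq_false]
    intro j hj
    rw [PySem.List.mem_pyRange_one] at hj
    rw [PySem.Int.mod_eq_emod_of_pos (by omega)]
    by_cases hj1 : j = 1
    · rw [hj1]; decide
    · by_cases hj2 : j = 2
      · rw [hj2]; decide
      · have h22 : (2 : Int) % j = 2 := Int.emod_eq_of_lt (by omega) (by omega)
        simp [h22]
  · simp only [ne_eq, hi2, not_false_eq_true, decide_true]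
    rw [List.any_eq_true]
    by_cases hi1 : i = 1
    · subst hi1
      refine ⟨2, ?_, ?_⟩
      · rw [PySem.List.mem_pyRange_one]; omega
      · rw [PySem.Int.mod_eq_emod_of_pos (by omega)]; decide
    · -- i ≥ 3 : take j = i - 1
      refine ⟨i - 1, ?_, ?_⟩
      · rw [PySem.List.mem_pyRange_one]; omega
      · rw [PySem.Int.mod_eq_emod_of_pos (by omega)]
        have hrw : i % (i - 1) = (1 + (i - 1) * 1) % (i - 1) := by ring_nf
        rw [hrw, Int.add_mul_emod_self_left, Int.emod_eq_of_lt (by omega) (by omega)]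
        simp

theorem pv_countP_ne_two (n : Int) (hn : 2 ≤ n) :
    ((PySem.List.pyRange 1 (n + 1) 1).countP (fun i => decide (i ≠ 2)) : Int) = n - 1 := by
  have hlen : (PySem.List.pyRange 1 (n + 1) 1).length = n.toNat := by
    rw [PySem.List.length_pyRange_one]; omega
  have hmem : (2 : Int) ∈ PySem.List.pyRange 1 (n + 1) 1 := by
    rw [PySem.List.mem_pyRange_one]; omega
  have hcnt : (PySem.List.pyRange 1 (n + 1) 1).count 2 = 1 :=
    List.count_eq_one_of_mem (PySem.List.nodup_pyRange_one 1 (n + 1)) hmem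
  have hsplit := List.length_eq_countP_add_countP (p := fun i : Int => decide (i ≠ 2))
    (l := PySem.List.pyRange 1 (n + 1) 1)
  have hcompl : (PySem.List.pyRange 1 (n + 1) 1).countP (fun a => decide ¬(decide (a ≠ 2) = true))
      = (PySem.List.pyRange 1 (n + 1) 1).count 2 := by
    rw [List.count_eq_countP]
    apply List.countP_congr
    intro i _
    by_cases h : i = 2 <;> simp [h]
  omega

-- ===== VERDICT (by name: the statement is the Claim_ definition above) =====
theorem distinctIntegers_spec : Claim_equal_distinctIntegers := by
  intro n _
  show distinctIntegers n = distinctIntegers_alt n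
  unfold distinctIntegers distinctIntegers_alt
  by_cases h1 : n = 1
  · simp [h1]
  · rw [if_neg (by simp [h1]), if_neg (by simp [h1])]
    by_cases h0 : n ≤ 1
    · -- empty range: both loops do nothing, the result is 0
      rw [PySem.List.pyRange_one_eq_nil (by omega)]
      simp
      omega
    · have hn : 2 ≤ n := by omega
      rw [pv_outer_eq _ _ _ _ (PySem.List.nodup_pyRange_one 1 (n + 1)) (by intro i _; simp)]
      have hcongr : (PySem.List.pyRange 1 (n + 1) 1).countP
            (fun i => (PySem.List.pyRange 1 (n + 1) 1).any (fun j => PySem.Int.mod i j == 1))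
          = (PySem.List.pyRange 1 (n + 1) 1).countP (fun i => decide (i ≠ 2)) := by
        apply List.countP_congr
        intro i hi
        rw [PySem.List.mem_pyRange_one] at hi
        rw [pv_any_iff n i hn hi.1 hi.2]
      rw [hcongr, pv_countP_ne_two n hn]
      omega
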